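-- pv_equiv track=rewrite | github.com/CtfChan/CSC180-IntroToPython | lab5.py | expressible_as_sum_squares
-- ===== SOURCE A (Python) =====
-- def expressible_as_sum_squares(k):
--     count = 0
--     for i in range(1, k):
--         for p in range(i, k):
--             if i **2 + p**2 == k:
--                 count += 1
--     if count >= 2:
--         return True
--     return False
-- ===== SOURCE B (Python) =====
-- def _isqrt(n):
--     r = 0
--     while (r + 1) * (r + 1) <= n:
--         r += 1
--     return r
--
-- def expressible_as_sum_squares(k):
--     count = 0
--     i = 1
--     while 2 * i * i <= k:
--         n = k - i * i
--         r = _isqrt(n)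
--         if r * r == n:
--             count += 1
--         i += 1
--     return count >= 2
-- ===== Notes on version B (the rewrite author's own statement) =====
-- stated objective: faster
-- what changed: Instead of scanning all pairs (i,p) below k, B walks i only while twice its square stays at most k and tests whether k minus i squared is a perfect square via a hand-written integer-square-root helper.
import Mathlib
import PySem

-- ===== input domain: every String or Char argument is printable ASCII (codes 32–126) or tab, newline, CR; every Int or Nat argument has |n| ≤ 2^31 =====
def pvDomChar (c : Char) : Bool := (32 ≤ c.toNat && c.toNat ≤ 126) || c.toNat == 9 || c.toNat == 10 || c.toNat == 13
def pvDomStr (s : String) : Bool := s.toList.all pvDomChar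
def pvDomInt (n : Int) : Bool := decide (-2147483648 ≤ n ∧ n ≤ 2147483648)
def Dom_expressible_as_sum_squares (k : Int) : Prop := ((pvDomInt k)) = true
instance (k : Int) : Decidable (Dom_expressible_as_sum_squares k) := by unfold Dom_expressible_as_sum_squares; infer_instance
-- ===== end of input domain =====

-- B replaces A's O(k^2) scan over all pairs by an O(k) loop that, for each i with 2*i*i ≤ k,
-- tests whether k - i*i is a perfect square via a hand-written integer square root (faster).

-- ===== PORT A =====
def expressible_as_sum_squares (k : Int) : Bool :=
  let count : Int :=
    (PySem.List.pyRange 1 k 1).foldl (fun c i =>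
      (PySem.List.pyRange i k 1).foldl (fun c2 p =>
        if i ^ 2 + p ^ 2 = k then c2 + 1 else c2) c) 0
  if 2 ≤ count then true else false

-- ===== PORT B =====
-- helper _isqrt: 'r = 0; while (r+1)*(r+1) <= n: r += 1; return r'  (fuel n.toNat bounds the loop)
def pvIsqrtAux (n : Int) : Nat → Int → Int
  | 0, r => r
  | fuel + 1, r => if (r + 1) * (r + 1) ≤ n then pvIsqrtAux n fuel (r + 1) else r

def pvIsqrt (n : Int) : Int := pvIsqrtAux n n.toNat 0

-- main loop: 'i = 1; while 2*i*i <= k: …; i += 1'  (fuel k.toNat bounds the loop)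
def pvAltAux (k : Int) : Nat → Int → Int → Int
  | 0, _, count => count
  | fuel + 1, i, count =>
    if 2 * i * i ≤ k then
      let n := k - i * i
      let r := pvIsqrt n
      pvAltAux k fuel (i + 1) (if r * r = n then count + 1 else count)
    else count

def expressible_as_sum_squares_alt (k : Int) : Bool :=
  decide (2 ≤ pvAltAux k k.toNat 1 0)

-- ===== PRECONDITION & SPEC =====
def Spec_expressible_as_sum_squares (k : Int) (out : Bool) : Prop := out = expressible_as_sum_squares_alt k
instance (k : Int) (out : Bool) : Decidable (Spec_expressible_as_sum_squares k out) := by unfold Spec_expressible_as_sum_squares; infer_instance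

-- ===== CLAIM (what is proved, stated in full; the proofs are below) =====
def Claim_equal_expressible_as_sum_squares : Prop := ∀ (k : Int), Dom_expressible_as_sum_squares k → Spec_expressible_as_sum_squares k (expressible_as_sum_squares k)

-- ===== LEMMAS AND PROOFS =====

-- the per-i condition both loops count: 2*i*i ≤ k and k - i*i is a perfect square
def pvCond (k i : Int) : Bool :=
  decide (2 * i * i ≤ k) && decide (pvIsqrt (k - i * i) * pvIsqrt (k - i * i) = k - i * i)

lemma pvCond_iff (k i : Int) :
    pvCond k i = true ↔ (2 * i * i ≤ k ∧ pvIsqrt (k - i * i) * pvIsqrt (k - i * i) = k - i * i) := by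
  simp [pvCond]

lemma pvIsqrtAux_spec (n : Int) : ∀ (fuel : Nat) (r : Int), 0 ≤ r → r * r ≤ n →
    n < (r + fuel + 1) * (r + fuel + 1) →
    0 ≤ pvIsqrtAux n fuel r ∧ pvIsqrtAux n fuel r * pvIsqrtAux n fuel r ≤ n ∧
      n < (pvIsqrtAux n fuel r + 1) * (pvIsqrtAux n fuel r + 1) := by
  intro fuel
  induction fuel with
  | zero =>
    intro r hr h1 h2
    simp only [pvIsqrtAux]
    refine ⟨hr, h1, ?_⟩
    simpa using h2
  | succ fuel ih =>
    intro r hr h1 h2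
    simp only [pvIsqrtAux]
    by_cases h : (r + 1) * (r + 1) ≤ n
    · simp only [h, if_true]
      refine ih (r + 1) (by omega) h ?_
      have : (r + 1 + fuel + 1 : Int) = r + (fuel + 1) + 1 := by ring
      rw [this]; exact h2
    · simp only [h, if_false]
      exact ⟨hr, h1, by omega⟩

lemma pvIsqrt_spec (n : Int) (h : 0 ≤ n) :
    0 ≤ pvIsqrt n ∧ pvIsqrt n * pvIsqrt n ≤ n ∧ n < (pvIsqrt n + 1) * (pvIsqrt n + 1) := by
  refine pvIsqrtAux_spec n n.toNat 0 le_rfl (by simpa using h) ?_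
  have hn : ((n.toNat : Int)) = n := Int.toNat_of_nonneg h
  nlinarith [hn]

-- a positive square root is THE pvIsqrt
lemma pvIsqrt_unique (n p : Int) (hp : 0 < p) (hpn : p * p = n) : pvIsqrt n = p := by
  have h0 : 0 ≤ n := by nlinarith
  obtain ⟨h1, h2, h3⟩ := pvIsqrt_spec n h0
  nlinarith

-- A's inner loop over p counts 1 exactly when pvCond k i holds (for 1 ≤ i < k)
lemma inner_count (k i : Int) (h1 : 1 ≤ i) (h2 : i < k) :
    (PySem.List.pyRange i k 1).countP (fun p => decide (i ^ 2 + p ^ 2 = k)) =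
      if pvCond k i then 1 else 0 := by
  by_cases hle : 2 * i * i ≤ k
  · have hn0 : 0 ≤ k - i * i := by nlinarith
    obtain ⟨hs0, hs1, hs2⟩ := pvIsqrt_spec (k - i * i) hn0
    set s := pvIsqrt (k - i * i) with hs
    by_cases hsq : s * s = k - i * i
    · have hcond : pvCond k i = true := (pvCond_iff k i).2 ⟨hle, hsq⟩
      rw [hcond, if_pos rfl]
      have hsi : i ≤ s := by nlinarith
      have hsk : s < k := by nlinarith
      rw [PySem.List.pyRange_one_append i s k hsi (le_of_lt hsk),
          PySem.List.pyRange_one_cons hsk, List.countP_append, List.countP_cons]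
      have hl : (PySem.List.pyRange i s 1).countP (fun p => decide (i ^ 2 + p ^ 2 = k)) = 0 := by
        rw [List.countP_eq_zero]
        intro p hp
        rw [PySem.List.mem_pyRange_one] at hp
        simp only [decide_eq_true_eq]
        intro hcontra
        nlinarith [hp.1, hp.2]
      have hr : (PySem.List.pyRange (s + 1) k 1).countP (fun p => decide (i ^ 2 + p ^ 2 = k)) = 0 := by
        rw [List.countP_eq_zero]
        intro p hp
        rw [PySem.List.mem_pyRange_one] at hp
        simp only [decide_eq_true_eq]
        intro hcontra
        nlinarith [hp.1, hp.2]
      have hmid : (decide (i ^ 2 + s ^ 2 = k)) = true := by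
        simp only [decide_eq_true_eq]; nlinarith
      rw [hl, hr, hmid]
      simp
    · have hcond : pvCond k i = false := by
        rw [Bool.eq_false_iff]; intro hc; exact hsq ((pvCond_iff k i).1 hc).2
      rw [hcond, if_neg (by simp), List.countP_eq_zero]
      intro p hp
      rw [PySem.List.mem_pyRange_one] at hp
      simp only [decide_eq_true_eq]
      intro hcontra
      have hp0 : 0 < p := by omega
      have : pvIsqrt (k - i * i) = p := pvIsqrt_unique _ p hp0 (by nlinarith)
      apply hsq
      rw [hs, this]; nlinarith
  · have hcond : pvCond k i = false := by
      rw [Bool.eq_false_iff]; intro hc; exact hle ((pvCond_iff k i).1 hc).1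
    rw [hcond, if_neg (by simp), List.countP_eq_zero]
    intro p hp
    rw [PySem.List.mem_pyRange_one] at hp
    simp only [decide_eq_true_eq]
    intro hcontra
    nlinarith [hp.1, hp.2]

-- A's whole double loop equals the number of i in [1,k) satisfying pvCond
lemma countA_eq (k : Int) :
    (PySem.List.pyRange 1 k 1).foldl (fun c i =>
      (PySem.List.pyRange i k 1).foldl (fun c2 p =>
        if i ^ 2 + p ^ 2 = k then c2 + 1 else c2) c) (0 : Int) =
    ((PySem.List.pyRange 1 k 1).countP (fun i => pvCond k i) : Int) := by
  have hstep : (PySem.List.pyRange 1 k 1).foldl (fun c i =>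
      (PySem.List.pyRange i k 1).foldl (fun c2 p =>
        if i ^ 2 + p ^ 2 = k then c2 + 1 else c2) c) (0 : Int) =
      (PySem.List.pyRange 1 k 1).foldl (fun c i => if pvCond k i then c + 1 else c) (0 : Int) := by
    apply PySem.List.foldl_congr_mem
    intro c i hi
    rw [PySem.List.mem_pyRange_one] at hi
    rw [PySem.List.foldl_ite_add_one, inner_count k i hi.1 hi.2]
    split_ifs <;> simp
  rw [hstep, PySem.List.foldl_ite_add_one]
  simp

-- B's loop counts exactly the i in [i₀,k) satisfying pvCond, given enough fuel
lemma pvAltAux_eq (k : Int) : ∀ (fuel : Nat) (i c : Int), 1 ≤ i →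
    k < 2 * (i + fuel) * (i + fuel) →
    pvAltAux k fuel i c = c + ((PySem.List.pyRange i k 1).countP (fun j => pvCond k j) : Int) := by
  intro fuel
  induction fuel with
  | zero =>
    intro i c hi hf
    simp only [pvAltAux]
    have : (PySem.List.pyRange i k 1).countP (fun j => pvCond k j) = 0 := by
      rw [List.countP_eq_zero]
      intro j hj
      rw [PySem.List.mem_pyRange_one] at hj
      intro hc
      have := ((pvCond_iff k j).1 hc).1
      simp only [Nat.cast_zero, add_zero] at hf
      nlinarith [hj.1]
    rw [this]; simp
  | succ fuel ih =>
    intro i c hi hf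
    simp only [pvAltAux]
    by_cases h : 2 * i * i ≤ k
    · simp only [h, if_true]
      have hik : i < k := by nlinarith
      rw [PySem.List.pyRange_one_cons hik, List.countP_cons]
      have hrec := ih (i + 1) (if pvIsqrt (k - i * i) * pvIsqrt (k - i * i) = k - i * i then c + 1 else c)
        (by omega) (by push_cast at hf ⊢; nlinarith)
      rw [hrec]
      have hcond : pvCond k i = (decide (pvIsqrt (k - i * i) * pvIsqrt (k - i * i) = k - i * i)) := by
        simp [pvCond, h]
      rw [hcond]
      split_ifs with hq hq2 hq2
      · push_cast; ring
      · exact absurd (by simp [hq]) hq2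
      · exact absurd (by simpa using hq2) hq
      · push_cast; ring
    · simp only [h, if_false]
      have : (PySem.List.pyRange i k 1).countP (fun j => pvCond k j) = 0 := by
        rw [List.countP_eq_zero]
        intro j hj
        rw [PySem.List.mem_pyRange_one] at hj
        intro hc
        nlinarith [hj.1, ((pvCond_iff k j).1 hc).1]
      rw [this]; simp

lemma countB_eq (k : Int) :
    pvAltAux k k.toNat 1 0 =
      ((PySem.List.pyRange 1 k 1).countP (fun j => pvCond k j) : Int) := by
  have h := pvAltAux_eq k k.toNat 1 0 le_rfl ?_
  · simpa using h
  · by_cases hk : 0 ≤ k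
    · have hn : ((k.toNat : Int)) = k := Int.toNat_of_nonneg hk
      rw [hn]; nlinarith
    · have : k.toNat = 0 := Int.toNat_of_nonpos (by omega)
      rw [this]; push_cast; omega

-- ===== VERDICT (by name: the statement is the Claim_ definition above) =====
theorem expressible_as_sum_squares_spec : Claim_equal_expressible_as_sum_squares := by
  intro k _
  simp only [Spec_expressible_as_sum_squares, expressible_as_sum_squares,
    expressible_as_sum_squares_alt]
  rw [countA_eq, countB_eq]
  split_ifs with h <;> simp [h]
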